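-- pv_equiv track=rewrite | github.com/Dileepvk98/multimedia-steganography | image.py | text_formatter
-- ===== SOURCE A (Python) =====
-- def text_formatter(data):
--     lines = []
--     for line in data:
--         words = line.replace("\n","~").split()
--         lines.append(words)
--
--     words_ascii = []
--     for line in lines:
--         for word in line:
--             for c in word:
--                 words_ascii.append(ord(c))
--             if ord(c) != ord('~'):
--                 words_ascii.append(ord(' '))
--     return words_ascii
-- ===== SOURCE B (Python) =====
-- def text_formatter(data):
--     # single streaming pass: a small state machine over the characters, no tokenization
--     out = []
--     for line in data:
--         prev = None  # last character of the word currently being read, None = between words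
--         for c in line:
--             if c == "\n":
--                 c = "~"
--             if c.isspace():
--                 if prev is not None and prev != "~":
--                     out.append(ord(" "))
--                 prev = None
--             else:
--                 out.append(ord(c))
--                 prev = c
--         if prev is not None and prev != "~":
--             out.append(ord(" "))
--     return out
-- ===== Notes on version B (the rewrite author's own statement) =====
-- stated objective: alternative
-- what changed: B replaces A's tokenize-then-emit pipeline (replace, split into word lists, nested word/char loops with a leftover loop variable deciding the separator) by a single streaming character-level state machine that never materializes words: it scans each line's characters once, tracking only the last in-word character, and emits codes and separators online.
import Mathlib
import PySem

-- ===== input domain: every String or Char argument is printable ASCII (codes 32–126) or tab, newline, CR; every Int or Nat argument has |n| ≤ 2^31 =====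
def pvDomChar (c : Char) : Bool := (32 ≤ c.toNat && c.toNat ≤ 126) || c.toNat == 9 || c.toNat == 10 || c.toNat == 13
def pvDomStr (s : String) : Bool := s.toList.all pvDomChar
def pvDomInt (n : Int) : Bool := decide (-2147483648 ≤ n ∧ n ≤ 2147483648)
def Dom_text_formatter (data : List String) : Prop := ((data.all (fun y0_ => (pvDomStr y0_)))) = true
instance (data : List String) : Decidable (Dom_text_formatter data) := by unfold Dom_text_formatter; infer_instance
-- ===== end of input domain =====

-- B replaces A's replace/split/nested-word-loops pipeline by a single streaming character-level
-- state machine that never materializes words (objective: alternative algorithm, same cost).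

-- ===== PORT A =====
-- State of A's inner loops: (words_ascii so far, the Python variable c — the last char
-- appended; 'none' = c not yet assigned, unreachable for words produced by split()).
def text_formatter (data : List String) : List Int :=
  let lines : List (List String) :=
    data.foldl (fun ls line =>
      ls ++ [PySem.Str.split₀ (PySem.Str.replace line "\n" "~")]) []
  let st : List Int × Option Char :=
    lines.foldl (fun st line =>
      line.foldl (fun st word =>
        let st' := word.toList.foldl
          (fun (st : List Int × Option Char) c => (st.1 ++ [(c.toNat : Int)], some c)) st
        match st'.2 with
        | some c =>
            if (c.toNat : Int) ≠ ('~'.toNat : Int) then (st'.1 ++ [((' '.toNat : Nat) : Int)], st'.2)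
            else st'
        | none => st'  -- Python would raise NameError here; never reached in A (split words are nonempty)
        ) st) ([], none)
  st.1

-- ===== PORT B =====
def text_formatter_alt (data : List String) : List Int :=
  data.foldl (fun out line =>
    let st : List Int × Option Char :=
      line.toList.foldl (fun (st : List Int × Option Char) c =>
        let c := if c = '\n' then '~' else c
        if PySem.Chars.isspace c then
          match st.2 with
          | some p => (if p ≠ '~' then st.1 ++ [((' '.toNat : Nat) : Int)] else st.1, none)
          | none => (st.1, none)
        else (st.1 ++ [(c.toNat : Int)], some c)) (out, none)
    match st.2 with
    | some p => if p ≠ '~' then st.1 ++ [((' '.toNat : Nat) : Int)] else st.1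
    | none => st.1) []

-- ===== PRECONDITION & SPEC =====
def Spec_text_formatter (data : List String) (out : List Int) : Prop := out = text_formatter_alt data
instance (data : List String) (out : List Int) : Decidable (Spec_text_formatter data out) := by unfold Spec_text_formatter; infer_instance

-- ===== CLAIM (what is proved, stated in full; the proofs are below) =====
def Claim_equal_text_formatter : Prop := ∀ (data : List String), Dom_text_formatter data → Spec_text_formatter data (text_formatter data)

-- ===== LEMMAS AND PROOFS =====

-- contribution of one (nonempty) word to the output
def pvContrib (w : List Char) : List Int :=
  w.map (fun c => (c.toNat : Int)) ++ (if w.getLast? = some '~' then [] else [(32 : Int)])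

-- the step functions of A's loops, named for the proofs (definitionally the port's lambdas)
def pvCharStep (st : List Int × Option Char) (c : Char) : List Int × Option Char :=
  (st.1 ++ [(c.toNat : Int)], some c)

def pvWordStep (st : List Int × Option Char) (w : List Char) : List Int × Option Char :=
  let st' := w.foldl pvCharStep st
  match st'.2 with
  | some c =>
      if (c.toNat : Int) ≠ ('~'.toNat : Int) then (st'.1 ++ [((' '.toNat : Nat) : Int)], st'.2)
      else st'
  | none => st'

-- the words of a line, shared by A's port and the proofs
def pvWords (line : String) : List String :=
  PySem.Str.split₀ (PySem.Str.replace line "\n" "~")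

-- B's machine, named for the proofs (definitionally the port's lambdas)
def pvRepl (c : Char) : Char := if c = '\n' then '~' else c

def pvBStep (st : List Int × Option Char) (c : Char) : List Int × Option Char :=
  let c := pvRepl c
  if PySem.Chars.isspace c then
    match st.2 with
    | some p => (if p ≠ '~' then st.1 ++ [((' '.toNat : Nat) : Int)] else st.1, none)
    | none => (st.1, none)
  else (st.1 ++ [(c.toNat : Int)], some c)

def pvFinish (st : List Int × Option Char) : List Int :=
  match st.2 with
  | some p => if p ≠ '~' then st.1 ++ [((' '.toNat : Nat) : Int)] else st.1
  | none => st.1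

-- the codes B's machine still emits from state 'prev' while reading s (no newline-replace)
def pvEndB : Option Char → List Int
  | none => []
  | some p => if p ≠ '~' then [(32 : Int)] else []

def pvG : List Char → Option Char → List Int
  | [], prev => pvEndB prev
  | c :: s, prev =>
      if PySem.Chars.isspace c then pvEndB prev ++ pvG s none
      else (c.toNat : Int) :: pvG s (some c)

-- every word produced by Chars.split₀ is nonempty
theorem pv_split₀_go_mem_ne_nil (s : List Char) : ∀ (cur : List Char) (acc : List (List Char)),
    (∀ w ∈ acc, w ≠ []) → ∀ w ∈ PySem.Chars.split₀.go s cur acc, w ≠ [] := by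
  induction s with
  | nil =>
    intro cur acc hacc w hw
    simp only [PySem.Chars.split₀.go] at hw
    split at hw
    · exact hacc w (by simpa using hw)
    · rename_i hcur
      simp only [List.mem_reverse, List.mem_cons] at hw
      rcases hw with h | h
      · subst h; simp [List.isEmpty_iff] at hcur; simpa using hcur
      · exact hacc w h
  | cons c rest ih =>
    intro cur acc hacc w hw
    simp only [PySem.Chars.split₀.go] at hw
    split at hw
    · split at hw
      · exact ih [] acc hacc w hw
      · refine ih [] (cur.reverse :: acc) ?_ w hw
        intro x hx
        rcases List.mem_cons.mp hx with h | h
        · subst h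
          rename_i hcur
          simp [List.isEmpty_iff] at hcur
          simpa using hcur
        · exact hacc x h
    · exact ih (c :: cur) acc hacc w hw

theorem pv_split₀_mem_ne_nil (s : List Char) (w : List Char)
    (hw : w ∈ PySem.Chars.split₀ s) : w ≠ [] :=
  pv_split₀_go_mem_ne_nil s [] [] (by simp) w hw

theorem pv_words_ne_empty (line : String) : ∀ w ∈ pvWords line, w.toList ≠ [] := by
  intro w hw
  simp only [pvWords, PySem.Str.split₀] at hw
  obtain ⟨cs, hcs, rfl⟩ := List.mem_map.mp hw
  simpa using pv_split₀_mem_ne_nil _ cs hcs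

-- A's innermost loop over a word's characters
theorem pv_innerA (w : List Char) (acc : List Int) (oc : Option Char) :
    w.foldl pvCharStep (acc, oc)
      = (acc ++ w.map (fun c => (c.toNat : Int)), if w = [] then oc else w.getLast?) := by
  induction w generalizing acc oc with
  | nil => simp
  | cons c rest ih =>
    simp only [List.foldl_cons, List.map_cons, pvCharStep]
    rw [ih]
    rcases rest with _ | ⟨d, rest'⟩ <;> simp

-- A's step for one nonempty word
theorem pv_wordStep (w : List Char) (hw : w ≠ []) (acc : List Int) (oc : Option Char) :
    pvWordStep (acc, oc) w = (acc ++ pvContrib w, w.getLast?) := by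
  unfold pvWordStep
  rw [pv_innerA, if_neg hw]
  rcases hlast : w.getLast? with _ | c
  · exact absurd (List.getLast?_eq_none_iff.mp hlast) hw
  · simp only [pvContrib, hlast]
    by_cases hc : c = '~'
    · subst hc; simp
    · have hne : (c.toNat : Int) ≠ ('~'.toNat : Int) := by
        intro h
        apply hc
        have hnat : c.toNat = '~'.toNat := by exact_mod_cast h
        have := Char.ofNat_toNat c
        rw [← this, hnat]; rfl
      have hcc : ¬ (some c = some '~') := by simpa using hc
      simp only [if_pos hne, if_neg hcc]
      simp

-- A's loop over the words of one line (all words nonempty)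
theorem pv_lineA (ws : List (List Char)) (acc : List Int) (oc : Option Char)
    (h : ∀ w ∈ ws, w ≠ []) :
    ∃ oc', ws.foldl pvWordStep (acc, oc) = (acc ++ ws.flatMap pvContrib, oc') := by
  induction ws generalizing acc oc with
  | nil => exact ⟨oc, by simp⟩
  | cons w rest ih =>
    simp only [List.foldl_cons]
    rw [pv_wordStep w (h w (List.mem_cons_self ..))]
    obtain ⟨oc', h'⟩ := ih (acc ++ pvContrib w) w.getLast?
      (fun x hx => h x (List.mem_cons_of_mem _ hx))
    exact ⟨oc', by rw [h']; simp⟩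

-- A's lines list is just a map
theorem pv_linesA (data : List String) :
    data.foldl (fun ls line => ls ++ [pvWords line]) [] = data.map pvWords := by
  have h : ∀ (ls : List (List String)), data.foldl (fun ls line =>
      ls ++ [pvWords line]) ls = ls ++ data.map pvWords := by
    induction data with
    | nil => simp
    | cons line rest ih => intro ls; simp [ih]
  simpa using h []

-- A's outer loop over the lines
theorem pv_outerA (lines : List (List String)) (acc : List Int) (oc : Option Char)
    (h : ∀ ln ∈ lines, ∀ w ∈ ln, w.toList ≠ []) :
    ∃ oc', lines.foldl (fun st line =>
        line.foldl (fun st word => pvWordStep st word.toList) st) (acc, oc)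
      = (acc ++ lines.flatMap (fun ln => ln.flatMap (fun w => pvContrib w.toList)), oc') := by
  induction lines generalizing acc oc with
  | nil => exact ⟨oc, by simp⟩
  | cons ln rest ih =>
    simp only [List.foldl_cons, List.flatMap_cons]
    have hfold : ln.foldl (fun st word => pvWordStep st word.toList) (acc, oc)
        = (ln.map String.toList).foldl pvWordStep (acc, oc) := by
      rw [List.foldl_map]
    obtain ⟨oc1, h1⟩ := pv_lineA (ln.map String.toList) acc oc
      (by intro w hw
          obtain ⟨s, hs, rfl⟩ := List.mem_map.mp hw
          exact h ln (List.mem_cons_self ..) s hs)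
    rw [hfold, h1]
    obtain ⟨oc', h'⟩ := ih (acc ++ (ln.map String.toList).flatMap pvContrib) oc1
      (fun l hl => h l (List.mem_cons_of_mem _ hl))
    refine ⟨oc', by rw [h']; simp [List.flatMap_map]⟩

-- B's per-line character loop computes pvG of the newline-replaced characters
theorem pv_lineB (s : List Char) (out : List Int) (prev : Option Char) :
    pvFinish (s.foldl pvBStep (out, prev)) = out ++ pvG (s.map pvRepl) prev := by
  induction s generalizing out prev with
  | nil =>
    rcases prev with _ | p
    · simp [pvFinish, pvG, pvEndB]
    · by_cases hp : p = '~' <;> simp [pvFinish, pvG, pvEndB, hp]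
  | cons c rest ih =>
    simp only [List.foldl_cons, List.map_cons, pvG]
    by_cases hsp : PySem.Chars.isspace (pvRepl c) = true
    · have hstep : pvBStep (out, prev) c = (out ++ pvEndB prev, none) := by
        rcases prev with _ | p
        · simp [pvBStep, hsp, pvEndB]
        · by_cases hp : p = '~' <;> simp [pvBStep, hsp, pvEndB, hp]
      rw [hstep, ih, if_pos hsp]
      simp
    · have hstep : pvBStep (out, prev) c
          = (out ++ [((pvRepl c).toNat : Int)], some (pvRepl c)) := by
        simp [pvBStep, hsp]
      rw [hstep, ih, if_neg hsp]
      simp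

-- pulling the accumulator out of split₀.go
theorem pv_go_acc (s : List Char) : ∀ (cur : List Char) (acc : List (List Char)),
    PySem.Chars.split₀.go s cur acc = acc.reverse ++ PySem.Chars.split₀.go s cur [] := by
  induction s with
  | nil =>
    intro cur acc
    simp only [PySem.Chars.split₀.go]
    split <;> simp
  | cons c rest ih =>
    intro cur acc
    simp only [PySem.Chars.split₀.go]
    split
    · split
      · exact ih [] acc
      · rw [ih [] (cur.reverse :: acc), ih [] [cur.reverse]]
        simp
    · exact ih (c :: cur) acc

-- split₀-then-contribute equals B's machine pvG (cur = reversed current partial word)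
theorem pv_go_pvG (s : List Char) : ∀ (cur : List Char),
    (PySem.Chars.split₀.go s cur []).flatMap pvContrib
      = cur.reverse.map (fun c => (c.toNat : Int)) ++ pvG s cur.head? := by
  induction s with
  | nil =>
    intro cur
    rcases cur with _ | ⟨h, t⟩
    · simp [PySem.Chars.split₀.go, pvG, pvEndB]
    · simp only [PySem.Chars.split₀.go]
      have hne : ((h :: t).isEmpty = true) = False := by simp
      rw [if_neg (by simp)]
      simp only [List.reverse_cons, List.reverse_nil, List.nil_append,
        List.flatMap_cons, List.flatMap_nil, List.append_nil, pvContrib, pvG]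
      rw [List.getLast?_concat]
      simp only [List.head?_cons, pvEndB]
      by_cases hh : h = '~'
      · simp [hh]
      · rw [if_neg (by simpa using hh), if_pos hh]
  | cons c rest ih =>
    intro cur
    simp only [PySem.Chars.split₀.go]
    by_cases hsp : PySem.Chars.isspace c = true
    · rw [if_pos hsp]
      rcases cur with _ | ⟨h, t⟩
      · rw [if_pos (by simp)]
        simpa [pvG, hsp, pvEndB] using ih []
      · rw [if_neg (by simp)]
        rw [pv_go_acc rest [] [(h :: t).reverse]]
        simp only [List.flatMap_append, List.reverse_cons, List.reverse_nil, List.nil_append,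
          List.flatMap_cons, List.flatMap_nil, List.append_nil]
        rw [ih []]
        simp only [pvG, hsp, List.head?_cons]
        simp only [pvContrib, List.reverse_cons, List.getLast?_concat,
          List.reverse_nil, List.map_nil, List.nil_append, pvEndB]
        by_cases hh : h = '~'
        · simp [hh]
        · rw [if_neg (by simpa using hh), if_pos hh]
          simp
    · rw [if_neg hsp]
      rw [ih (c :: cur)]
      simp only [pvG, hsp, List.head?_cons, List.reverse_cons, List.map_append]
      simp

-- replace with a one-character pattern is a map
theorem pv_replace_go (l : List Char) : ∀ (fuel : Nat) (acc : List Char), l.length ≤ fuel →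
    PySem.Chars.replace.go ['\n'] ['~'] fuel l acc = acc.reverse ++ l.map pvRepl := by
  induction l with
  | nil =>
    intro fuel acc _
    rcases fuel with _ | fuel <;> simp [PySem.Chars.replace.go]
  | cons c t ih =>
    intro fuel acc hle
    rcases fuel with _ | fuel
    · simp at hle
    · simp only [PySem.Chars.replace.go]
      by_cases hc : c = '\n'
      · subst hc
        rw [if_pos (by simp [List.isPrefixOf])]
        show PySem.Chars.replace.go ['\n'] ['~'] fuel t ('~' :: acc)
          = acc.reverse ++ List.map pvRepl ('\n' :: t)
        rw [ih fuel ('~' :: acc) (by simpa using hle)]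
        simp [pvRepl]
      · rw [if_neg (by simp [List.isPrefixOf]; exact fun h => hc h.symm)]
        rw [ih fuel (c :: acc) (by simpa using hle)]
        simp [pvRepl, hc]

theorem pv_replace_map (s : List Char) :
    PySem.Chars.replace s ['\n'] ['~'] = s.map pvRepl := by
  unfold PySem.Chars.replace
  rw [if_neg (by simp)]
  simpa using pv_replace_go s s.length [] le_rfl

-- per line: A's word contributions equal B's machine output
theorem pv_lineAB (line : String) :
    (pvWords line).flatMap (fun w => pvContrib w.toList)
      = pvG (line.toList.map pvRepl) none := by
  have h1 : pvWords line
      = (PySem.Chars.split₀ ((PySem.Str.replace line "\n" "~").toList)).map String.ofList := rfl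
  rw [h1]
  have h2 : ((PySem.Chars.split₀ ((PySem.Str.replace line "\n" "~").toList)).map
      String.ofList).flatMap (fun w => pvContrib w.toList)
      = (PySem.Chars.split₀ ((PySem.Str.replace line "\n" "~").toList)).flatMap pvContrib := by
    rw [List.flatMap_map]
    simp
  rw [h2]
  have h3 : (PySem.Str.replace line "\n" "~").toList = line.toList.map pvRepl := by
    rw [PySem.Str.toList_replace]
    have : ("\n" : String).toList = ['\n'] := rfl
    have h4 : ("~" : String).toList = ['~'] := rfl
    rw [this, h4, pv_replace_map]
  rw [h3]
  have h5 := pv_go_pvG (line.toList.map pvRepl) []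
  simpa [PySem.Chars.split₀] using h5

-- B's outer loop
theorem pv_outerB (data : List String) : ∀ (out : List Int),
    data.foldl (fun out line => pvFinish (line.toList.foldl pvBStep (out, none))) out
      = out ++ data.flatMap (fun line => pvG (line.toList.map pvRepl) none) := by
  induction data with
  | nil => intro out; simp
  | cons line rest ih =>
    intro out
    simp only [List.foldl_cons, List.flatMap_cons]
    rw [pv_lineB, ih]
    simp

-- ===== VERDICT (by name: the statement is the Claim_ definition above) =====
theorem text_formatter_spec : Claim_equal_text_formatter := by
  intro data _
  show text_formatter data = text_formatter_alt data
  have hA0 : text_formatter data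
      = ((data.foldl (fun ls line => ls ++ [pvWords line]) []).foldl (fun st line =>
          line.foldl (fun st word => pvWordStep st word.toList) st)
          (([], none) : List Int × Option Char)).1 := rfl
  have hB0 : text_formatter_alt data
      = data.foldl (fun out line => pvFinish (line.toList.foldl pvBStep (out, none))) [] := rfl
  rw [hA0, hB0, pv_linesA, pv_outerB]
  obtain ⟨oc', hA⟩ := pv_outerA (data.map pvWords) [] none
    (by intro ln hln w hw
        obtain ⟨line, _, rfl⟩ := List.mem_map.mp hln
        exact pv_words_ne_empty line w hw)
  rw [hA]
  simp only [List.nil_append, List.flatMap_map]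
  simp only [pv_lineAB]
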